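-- pv_equiv track=rewrite | github.com/BuzzScud/ALGO3D | math/math 2/thesis/deduplicate_thesis.py | create_section_map
-- ===== SOURCE A (Python) =====
-- from typing import List, Dict, Tuple
--
-- def create_section_map(lines: List[str], sections: List[Tuple[int, str, int]]) -> Dict[str, Tuple[int, int, List[str]]]:
--     """
--     Create a map of section titles to their content.
--     Returns dict mapping normalized title to (start_line, end_line, content)
--     """
--     section_map = {}
--
--     for i, (line_num, title, level) in enumerate(sections):
--         # Get end line
--         if i + 1 < len(sections):
--             # Find next section of same or higher level
--             end_line = len(lines)
--             for j in range(i + 1, len(sections)):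
--                 if sections[j][2] <= level:
--                     end_line = sections[j][0]
--                     break
--         else:
--             end_line = len(lines)
--
--         content = lines[line_num:end_line]
--         normalized_title = title.upper().strip()
--
--         # If duplicate, keep the longest version
--         if normalized_title in section_map:
--             existing_content = section_map[normalized_title][2]
--             if len(content) > len(existing_content):
--                 section_map[normalized_title] = (line_num, end_line, content)
--         else:
--             section_map[normalized_title] = (line_num, end_line, content)
--
--     return section_map
-- ===== SOURCE B (Python) =====
-- def create_section_map(lines, sections):
--     # One backward pass with a monotonic stack computes each section's end line
--     # (first following section with level <= current), then one forward pass builds the map.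
--     n = len(lines)
--     ends = [n] * len(sections)
--     stack = []  # (level, line_num), top at the end; levels weakly increasing toward the end? strictly decreasing from bottom
--     for i in range(len(sections) - 1, -1, -1):
--         line_num, _title, level = sections[i]
--         while stack and stack[-1][0] > level:
--             stack.pop()
--         if stack:
--             ends[i] = stack[-1][1]
--         stack.append((level, line_num))
--
--     section_map = {}
--     for (line_num, title, _level), end_line in zip(sections, ends):
--         content = lines[line_num:end_line]
--         key = title.upper().strip()
--         prev = section_map.get(key)
--         if prev is None or len(content) > len(prev[2]):
--             section_map[key] = (line_num, end_line, content)
--     return section_map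
-- ===== Notes on version B (the rewrite author's own statement) =====
-- stated objective: alternative
-- what changed: A rescans the remaining sections for each section to find its end line; B computes all end lines in a single backward pass with a monotonic stack, then builds the map in one forward pass; intended as faster (the end-line search drops from quadratic to linear), though content slicing dominates so measured speedups varied (1.3x-2x at the largest size).
import Mathlib
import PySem

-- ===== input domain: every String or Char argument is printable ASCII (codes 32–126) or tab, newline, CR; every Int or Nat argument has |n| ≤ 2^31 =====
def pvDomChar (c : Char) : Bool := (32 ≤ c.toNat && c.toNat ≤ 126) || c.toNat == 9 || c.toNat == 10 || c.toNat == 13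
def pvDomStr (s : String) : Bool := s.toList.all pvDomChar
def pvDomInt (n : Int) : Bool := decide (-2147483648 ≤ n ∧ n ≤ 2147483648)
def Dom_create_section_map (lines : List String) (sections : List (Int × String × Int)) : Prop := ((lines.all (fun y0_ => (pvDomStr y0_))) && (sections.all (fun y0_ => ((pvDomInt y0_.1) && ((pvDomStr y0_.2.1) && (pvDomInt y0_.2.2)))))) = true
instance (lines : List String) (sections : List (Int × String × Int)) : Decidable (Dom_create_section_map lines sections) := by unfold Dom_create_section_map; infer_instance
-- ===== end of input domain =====

-- B replaces A's per-section rescan of the remaining sections by a single backward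
-- monotonic-stack pass computing every end line; same return value on every input.

-- ===== PORT A =====
-- A's inner `for j in range(i+1, len(sections)): if sections[j][2] <= level: end_line = sections[j][0]; break`
def pvScanEnd (rest : List (Int × String × Int)) (level : Int) (nL : Int) : Int :=
  match rest with
  | [] => nL
  | (ln, _, lv) :: t => if lv ≤ level then ln else pvScanEnd t level nL

-- A's main loop over `enumerate(sections)`; the tail of the list is the range i+1..
def pvLoopA (lines : List String) (nL : Int) :
    List (Int × String × Int) → PySem.Dict String (Int × Int × List String) →
    PySem.Dict String (Int × Int × List String)
  | [], m => m
  | (ln, title, lv) :: rest, m =>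
    let endLine : Int := if 0 < rest.length then pvScanEnd rest lv nL else nL
    let content := PySem.List.slice lines (some ln) (some endLine)
    let nt := PySem.Str.strip (PySem.Str.upper title)
    let m' := match m.get? nt with
      | some p => if p.2.2.length < content.length then m.insert nt (ln, endLine, content) else m
      | none => m.insert nt (ln, endLine, content)
    pvLoopA lines nL rest m'

def create_section_map (lines : List String) (sections : List (Int × String × Int)) :
    List (String × Int × Int × List String) :=
  (pvLoopA lines (lines.length : Int) sections PySem.Dict.empty).items

-- ===== PORT B =====
-- B's `while stack and stack[-1][0] > level: stack.pop()`
def pvPop (level : Int) : List (Int × Int) → List (Int × Int)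
  | [] => []
  | (lv, ln) :: t => if level < lv then pvPop level t else (lv, ln) :: t

-- B's backward loop: returns (ends, stack); stack entries are (level, line_num), top first
def pvEnds (nL : Int) : List (Int × String × Int) → List Int × List (Int × Int)
  | [] => ([], [])
  | (ln, _, lv) :: rest =>
    let p := pvEnds nL rest
    let st := pvPop lv p.2
    let e := match st with | [] => nL | (_, l) :: _ => l
    (e :: p.1, (lv, ln) :: st)

-- B's forward loop over zip(sections, ends)
def pvLoopB (lines : List String) :
    List ((Int × String × Int) × Int) → PySem.Dict String (Int × Int × List String) →
    PySem.Dict String (Int × Int × List String)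
  | [], m => m
  | ((ln, title, _), e) :: rest, m =>
    let content := PySem.List.slice lines (some ln) (some e)
    let key := PySem.Str.strip (PySem.Str.upper title)
    let m' := match m.get? key with
      | none => m.insert key (ln, e, content)
      | some p => if p.2.2.length < content.length then m.insert key (ln, e, content) else m
    pvLoopB lines rest m'

def create_section_map_alt (lines : List String) (sections : List (Int × String × Int)) :
    List (String × Int × Int × List String) :=
  (pvLoopB lines (sections.zip (pvEnds (lines.length : Int) sections).1) PySem.Dict.empty).items

-- ===== PRECONDITION & SPEC =====
def Spec_create_section_map (lines : List String) (sections : List (Int × String × Int)) (out : List (String × Int × Int × List String)) : Prop := out = create_section_map_alt lines sections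
instance (lines : List String) (sections : List (Int × String × Int)) (out : List (String × Int × Int × List String)) : Decidable (Spec_create_section_map lines sections out) := by unfold Spec_create_section_map; infer_instance

-- ===== CLAIM (what is proved, stated in full; the proofs are below) =====
def Claim_equal_create_section_map : Prop := ∀ (lines : List String) (sections : List (Int × String × Int)), Dom_create_section_map lines sections → Spec_create_section_map lines sections (create_section_map lines sections)

-- ===== LEMMAS AND PROOFS =====

-- "first entry with level ≤ L" read off a stack
def pvFS (L : Int) (nL : Int) : List (Int × Int) → Int
  | [] => nL
  | (lv, ln) :: t => if lv ≤ L then ln else pvFS L nL t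

lemma pvFS_pop (L lv nL : Int) (st : List (Int × Int)) (h : L ≤ lv) :
    pvFS L nL (pvPop lv st) = pvFS L nL st := by
  induction st with
  | nil => rfl
  | cons a t ih =>
    obtain ⟨a1, a2⟩ := a
    simp only [pvPop]
    by_cases hgt : lv < a1
    · rw [if_pos hgt, ih]
      have hne : ¬ a1 ≤ L := by omega
      simp [pvFS, hne]
    · simp only [if_neg hgt]

lemma pvFS_pop_head (lv nL : Int) (st : List (Int × Int)) :
    (match pvPop lv st with | [] => nL | (_, l) :: _ => l) = pvFS lv nL (pvPop lv st) := by
  induction st with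
  | nil => rfl
  | cons a t ih =>
    obtain ⟨a1, a2⟩ := a
    simp only [pvPop]
    by_cases hgt : lv < a1
    · simp only [if_pos hgt, ih]
    · simp only [if_neg hgt, pvFS, if_pos (by omega : a1 ≤ lv)]

lemma pvEnds_stack (nL : Int) (secs : List (Int × String × Int)) (L : Int) :
    pvFS L nL (pvEnds nL secs).2 = pvScanEnd secs L nL := by
  induction secs generalizing L with
  | nil => rfl
  | cons a rest ih =>
    obtain ⟨ln, title, lv⟩ := a
    simp only [pvEnds, pvScanEnd, pvFS]
    by_cases hle : lv ≤ L
    · simp only [if_pos hle]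
    · simp only [if_neg hle, pvFS_pop L lv nL _ (by omega), ih]

lemma pvEnds_cons (nL ln lv : Int) (title : String) (rest : List (Int × String × Int)) :
    (pvEnds nL ((ln, title, lv) :: rest)).1 = pvScanEnd rest lv nL :: (pvEnds nL rest).1 := by
  simp only [pvEnds]
  rw [pvFS_pop_head, pvFS_pop lv lv nL _ le_rfl, pvEnds_stack]

lemma pvScanEnd_empty_or (rest : List (Int × String × Int)) (lv nL : Int) :
    (if 0 < rest.length then pvScanEnd rest lv nL else nL) = pvScanEnd rest lv nL := by
  cases rest with
  | nil => rfl
  | cons a t => rfl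

lemma loops_eq (lines : List String) (nL : Int) (secs : List (Int × String × Int))
    (m : PySem.Dict String (Int × Int × List String)) :
    pvLoopA lines nL secs m = pvLoopB lines (secs.zip (pvEnds nL secs).1) m := by
  induction secs generalizing m with
  | nil => rfl
  | cons a rest ih =>
    obtain ⟨ln, title, lv⟩ := a
    rw [pvEnds_cons]
    simp only [List.zip_cons_cons, pvLoopA, pvLoopB, pvScanEnd_empty_or]
    cases h : PySem.Dict.get? m (PySem.Str.strip (PySem.Str.upper title)) with
    | none => exact ih _
    | some p => exact ih _

-- ===== VERDICT (by name: the statement is the Claim_ definition above) =====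
theorem create_section_map_spec : Claim_equal_create_section_map := by
  intro lines sections _
  unfold Spec_create_section_map create_section_map create_section_map_alt
  rw [loops_eq]
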